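-- pv_equiv track=rewrite | github.com/SquamataBase/SquamataBase | FoodRecord/widgets.py | decompress
-- ===== SOURCE A (Python) =====
-- def decompress(value):
--     if value is None:
--         return [None, None, None]
--     values = [f for f in value.split('-')]
--     try:
--         return [values[0], values[1], values[2]]
--     except IndexError:
--         try:
--             return [values[0], values[1], None]
--         except IndexError:
--             try:
--                 return [values[0], None, None]
--             except IndexError:
--                 return [None, None, None]
-- ===== SOURCE B (Python) =====
-- def decompress(value):
--     if value is None:
--         return [None, None, None]
--     parts = value.split('-')
--     return (parts + [None, None, None])[:3]
-- ===== Notes on version B (the rewrite author's own statement) =====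
-- stated objective: simpler
-- what changed: Replaces the nested try/except IndexError cascade with pad-with-None and slice to length 3 over the split parts.
import Mathlib
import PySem

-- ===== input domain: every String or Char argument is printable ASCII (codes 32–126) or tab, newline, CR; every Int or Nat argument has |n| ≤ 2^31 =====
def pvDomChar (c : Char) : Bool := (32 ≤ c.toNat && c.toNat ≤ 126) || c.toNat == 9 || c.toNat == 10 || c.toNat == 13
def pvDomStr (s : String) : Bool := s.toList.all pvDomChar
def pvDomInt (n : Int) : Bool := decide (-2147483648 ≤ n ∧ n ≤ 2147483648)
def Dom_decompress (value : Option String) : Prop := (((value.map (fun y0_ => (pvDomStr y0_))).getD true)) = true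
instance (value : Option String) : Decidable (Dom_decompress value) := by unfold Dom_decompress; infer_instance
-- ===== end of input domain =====

-- B replaces A's nested try/except IndexError cascade with pad-with-None plus a slice (simpler decomposition).


-- ===== PORT A =====
-- literal transliteration: values[i] via pyGet?; the try bodies succeed iff every index is in range
def decompress (value : Option String) : List (Option String) :=
  match value with
  | none => [none, none, none]
  | some v =>
    let values := (PySem.Chars.splitOn v.toList ['-']).map String.ofList
    match PySem.List.pyGet? values 0, PySem.List.pyGet? values 1, PySem.List.pyGet? values 2 with
    | some a, some b, some c => [some a, some b, some c]
    | _, _, _ =>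
      match PySem.List.pyGet? values 0, PySem.List.pyGet? values 1 with
      | some a, some b => [some a, some b, none]
      | _, _ =>
        match PySem.List.pyGet? values 0 with
        | some a => [some a, none, none]
        | none => [none, none, none]

-- ===== PORT B =====
def decompress_alt (value : Option String) : List (Option String) :=
  match value with
  | none => [none, none, none]
  | some v =>
    let parts := (PySem.Chars.splitOn v.toList ['-']).map String.ofList
    PySem.List.slice (parts.map some ++ [none, none, none]) none (some 3)

-- ===== PRECONDITION & SPEC =====
def Spec_decompress (value : Option String) (out : List (Option String)) : Prop := out = decompress_alt value
instance (value : Option String) (out : List (Option String)) : Decidable (Spec_decompress value out) := by unfold Spec_decompress; infer_instance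

-- ===== CLAIM (what is proved, stated in full; the proofs are below) =====
def Claim_equal_decompress : Prop := ∀ (value : Option String), Dom_decompress value → Spec_decompress value (decompress value)

-- ===== LEMMAS AND PROOFS =====
theorem decompress_core (l : List String) :
    (match PySem.List.pyGet? l 0, PySem.List.pyGet? l 1, PySem.List.pyGet? l 2 with
      | some a, some b, some c => [some a, some b, some c]
      | _, _, _ =>
        match PySem.List.pyGet? l 0, PySem.List.pyGet? l 1 with
        | some a, some b => [some a, some b, none]
        | _, _ =>
          match PySem.List.pyGet? l 0 with
          | some a => [some a, none, none]
          | none => ([none, none, none] : List (Option String)))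
    = PySem.List.slice (l.map some ++ [none, none, none]) none (some 3) := by
  match l with
  | [] => rfl
  | [a] => rfl
  | [a, b] => rfl
  | a :: b :: c :: rest =>
    have h0 : PySem.List.pyGet? (a :: b :: c :: rest) 0 = some a := by
      simp [PySem.List.pyGet?, PySem.List.pyIdx?]
      rw [if_pos (by omega)]
      rfl
    have h1 : PySem.List.pyGet? (a :: b :: c :: rest) 1 = some b := by
      simp [PySem.List.pyGet?, PySem.List.pyIdx?]
      rw [if_pos (by omega)]
      rfl
    have h2 : PySem.List.pyGet? (a :: b :: c :: rest) 2 = some c := by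
      simp [PySem.List.pyGet?, PySem.List.pyIdx?]
      rw [if_pos (by omega)]
      rfl
    simp only [h0, h1, h2]
    simp [PySem.List.slice]

-- ===== VERDICT (by name: the statement is the Claim_ definition above) =====
theorem decompress_spec : Claim_equal_decompress := by
  intro value _
  unfold Spec_decompress decompress decompress_alt
  match value with
  | none => rfl
  | some v => exact decompress_core _
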